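-- pv_equiv track=rewrite | github.com/dohyeoplim/optimal-route-for-seoul-subway | route_planner/formatting.py | format_route_segments
-- ===== SOURCE A (Python) =====
-- def format_route_segments(path):
--     segments = []
--     if not path:
--         return segments
--
--     current_line = path[0][1]
--     current_direction = path[0][2]
--     segment_stations = [path[0][0]]
--
--     for i in range(1, len(path)):
--         station, line, direction = path[i]
--         if line != current_line:
--             direction_str = "→" if current_direction == 'F' else "←"
--             segments.append((f"{current_line} {direction_str}", " - ".join(segment_stations)))
--             current_line, current_direction = line, direction
--             segment_stations = [station]
--         else:
--             segment_stations.append(station)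
--
--     direction_str = "→" if current_direction == 'F' else "←"
--     segments.append((f"{current_line} {direction_str}", " - ".join(segment_stations)))
--     return segments
-- ===== SOURCE B (Python) =====
-- def format_route_segments(path):
--     if not path:
--         return []
--     bounds = [0] + [i for i, (prev, cur) in enumerate(zip(path, path[1:]), 1)
--                     if cur[1] != prev[1]] + [len(path)]
--     result = []
--     for b, e in zip(bounds, bounds[1:]):
--         seg = path[b:e]
--         _, line, direction = seg[0]
--         arrow = "→" if direction == 'F' else "←"
--         result.append((f"{line} {arrow}", " - ".join(s[0] for s in seg)))
--     return result
-- ===== Notes on version B (the rewrite author's own statement) =====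
-- stated objective: alternative
-- what changed: Replaced A's single-pass accumulator (current_line/current_direction/segment_stations with a post-loop flush) by two staged passes: first compute the list of boundary indices where the line changes, then slice the path between consecutive bounds and format each slice.
import Mathlib
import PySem

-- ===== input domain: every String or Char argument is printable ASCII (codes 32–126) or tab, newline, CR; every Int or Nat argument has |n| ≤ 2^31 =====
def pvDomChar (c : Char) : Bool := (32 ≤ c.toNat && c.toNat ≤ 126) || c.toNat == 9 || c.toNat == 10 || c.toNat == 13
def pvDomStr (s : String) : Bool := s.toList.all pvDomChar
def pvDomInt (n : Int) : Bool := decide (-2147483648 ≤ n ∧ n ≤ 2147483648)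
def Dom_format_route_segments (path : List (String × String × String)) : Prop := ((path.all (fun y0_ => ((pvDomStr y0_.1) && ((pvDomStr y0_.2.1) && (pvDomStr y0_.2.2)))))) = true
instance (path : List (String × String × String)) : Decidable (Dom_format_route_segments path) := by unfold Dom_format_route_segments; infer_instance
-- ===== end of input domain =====

-- B replaces A's single-pass accumulator loop by two staged passes: compute the boundary
-- indices where the line changes, then slice between consecutive bounds (objective: alternative).

-- ===== PORT A =====
-- the loop body of A's `for i in range(1, len(path))`, state = (segments, current_line, current_direction, segment_stations)
def pvAStep (st : List (String × String) × String × String × List String)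
    (y : String × String × String) : List (String × String) × String × String × List String :=
  let (segments, cl, cd, seg) := st
  let (station, line, direction) := y
  if line != cl then
    (segments ++ [(cl ++ " " ++ (if cd == "F" then "→" else "←"), PySem.Str.join " - " seg)],
     line, direction, [station])
  else
    (segments, cl, cd, seg ++ [station])

def format_route_segments (path : List (String × String × String)) : List (String × String) :=
  match path with
  | [] => []
  | (st0, ln0, dir0) :: rest =>
    let s := rest.foldl pvAStep ([], ln0, dir0, [st0])
    s.1 ++ [(s.2.1 ++ " " ++ (if s.2.2.1 == "F" then "→" else "←"), PySem.Str.join " - " s.2.2.2)]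

-- ===== PORT B =====
-- format one slice `seg = path[b:e]`: `_, line, direction = seg[0]` then the pair
def pvFmtSeg (seg : List (String × String × String)) : String × String :=
  match seg with
  | [] => ("", "")   -- unreachable: slices between consecutive bounds are nonempty
  | (_, ln, dir) :: _ =>
    (ln ++ " " ++ (if dir == "F" then "→" else "←"), PySem.Str.join " - " (seg.map (·.1)))

-- Source B: bounds = [0] + [i for i,(prev,cur) in enumerate(zip(path, path[1:]), 1) if cur[1] != prev[1]] + [len(path)];
-- then one pair (line arrow, joined stations) per (b, e) in zip(bounds, bounds[1:]) from the slice path[b:e]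
def format_route_segments_alt (path : List (String × String × String)) : List (String × String) :=
  match path with
  | [] => []
  | _ :: _ =>
    let bounds : List Int :=
      0 :: ((PySem.List.enumerate (path.zip path.tail) 1).filter
              (fun x => x.2.2.2.1 != x.2.1.2.1)).map (·.1)
        ++ [(path.length : Int)]
    (bounds.zip bounds.tail).map
      (fun be => pvFmtSeg (PySem.List.slice path (some be.1) (some be.2)))

-- ===== PRECONDITION & SPEC =====
def Spec_format_route_segments (path : List (String × String × String)) (out : List (String × String)) : Prop := out = format_route_segments_alt path
instance (path : List (String × String × String)) (out : List (String × String)) : Decidable (Spec_format_route_segments path out) := by unfold Spec_format_route_segments; infer_instance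

-- ===== CLAIM (what is proved, stated in full; the proofs are below) =====
def Claim_equal_format_route_segments : Prop := ∀ (path : List (String × String × String)), Dom_format_route_segments path → Spec_format_route_segments path (format_route_segments path)

-- ===== LEMMAS AND PROOFS =====

-- common intermediate: recursion on maximal same-line runs
def pvEmit (ln dir : String) (stations : List String) : String × String :=
  (ln ++ " " ++ (if dir == "F" then "→" else "←"), PySem.Str.join " - " stations)

def pvAltGo : List (String × String × String) → List (String × String)
  | [] => []
  | (st, ln, dir) :: rest =>
    let grp := rest.takeWhile (fun y => y.2.1 == ln)
    let rest' := rest.dropWhile (fun y => y.2.1 == ln)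
    pvEmit ln dir (st :: grp.map (·.1)) :: pvAltGo rest'
termination_by l => l.length
decreasing_by
  exact Nat.lt_succ_of_le (List.length_dropWhile_le _ _)

-- A's fold equals the run recursion
theorem pvLoop (rest : List (String × String × String)) :
    ∀ (acc : List (String × String)) (cl cd : String) (seg : List String),
    (let s := rest.foldl pvAStep (acc, cl, cd, seg)
     s.1 ++ [(s.2.1 ++ " " ++ (if s.2.2.1 == "F" then "→" else "←"), PySem.Str.join " - " s.2.2.2)])
    = acc ++ pvEmit cl cd (seg ++ (rest.takeWhile (fun y => y.2.1 == cl)).map (·.1))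
        :: pvAltGo (rest.dropWhile (fun y => y.2.1 == cl)) := by
  induction rest with
  | nil =>
    intro acc cl cd seg
    simp [pvAltGo, pvEmit]
  | cons y t ih =>
    intro acc cl cd seg
    obtain ⟨st, ln, dir⟩ := y
    by_cases h : (ln == cl) = true
    · have hcl : ln = cl := by simpa using h
      subst hcl
      rw [show ((st, ln, dir) :: t).foldl pvAStep (acc, ln, cd, seg)
            = t.foldl pvAStep (acc, ln, cd, seg ++ [st]) by simp [pvAStep]]
      rw [ih acc ln cd (seg ++ [st])]
      rw [List.takeWhile_cons_of_pos (by simp), List.dropWhile_cons_of_pos (by simp)]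
      simp [pvEmit]
    · have hb : (ln != cl) = true := by simp [bne]; simpa using h
      rw [show ((st, ln, dir) :: t).foldl pvAStep (acc, cl, cd, seg)
            = t.foldl pvAStep (acc ++ [pvEmit cl cd seg], ln, dir, [st]) by
        simp [pvAStep, hb, pvEmit]]
      rw [ih (acc ++ [pvEmit cl cd seg]) ln dir [st]]
      have hfalse : (fun y : String × String × String => y.2.1 == cl) (st, ln, dir) = false := by
        simpa using h
      rw [List.takeWhile_cons_of_neg (by simpa using hfalse),
          List.dropWhile_cons_of_neg (by simpa using hfalse)]
      simp [pvAltGo, pvEmit]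

-- Nat-valued boundary list (proof mirror of B's enumerate/filter pass)
def pvBndN : List (String × String × String) → Nat → List Nat
  | [], _ => []
  | [_], _ => []
  | a :: b :: t, s => (if b.2.1 != a.2.1 then [s] else []) ++ pvBndN (b :: t) (s + 1)

theorem pvBnd_eq (l : List (String × String × String)) :
    ∀ (s : Nat),
    ((PySem.List.enumerate (l.zip l.tail) (s : Int)).filter
        (fun x => x.2.2.2.1 != x.2.1.2.1)).map (·.1)
      = (pvBndN l s).map (fun (n : Nat) => (n : Int)) := by
  induction l with
  | nil => intro s; simp [pvBndN]
  | cons a t ih =>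
    intro s
    cases t with
    | nil => simp [pvBndN]
    | cons b t' =>
      have hthis := ih (s + 1)
      simp only [List.tail_cons, Nat.cast_add, Nat.cast_one] at hthis ⊢
      rw [List.zip_cons_cons, PySem.List.enumerate_cons, List.filter_cons]
      by_cases h : (b.2.1 != a.2.1) = true
      · rw [if_pos (show _ = true from h), pvBndN]
        simp only [h, if_pos, List.map_cons, List.singleton_append]
        rw [hthis]
      · rw [if_neg (by simpa using h), pvBndN]
        simp only [h, Bool.false_eq_true, if_false, List.nil_append]
        exact hthis

-- Nat-valued build (proof mirror of B's slice pass)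
def pvBuildN (path : List (String × String × String)) (bs : List Nat) : List (String × String) :=
  (bs.zip bs.tail).map (fun be => pvFmtSeg ((path.drop be.1).take (be.2 - be.1)))

-- B's Int slices over nat-cast bounds are pvBuildN
theorem pvCast (path : List (String × String × String)) (bs : List Nat) :
    ((bs.map (fun (n : Nat) => (n : Int))).zip ((bs.map (fun (n : Nat) => (n : Int))).tail)).map
        (fun be => pvFmtSeg (PySem.List.slice path (some be.1) (some be.2)))
      = pvBuildN path bs := by
  induction bs with
  | nil => simp [pvBuildN]
  | cons b1 bs' ih =>
    cases bs' with
    | nil => simp [pvBuildN]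
    | cons b2 bs'' =>
      unfold pvBuildN
      simp only [List.map_cons, List.tail_cons, List.zip_cons_cons]
      rw [PySem.List.slice_natCast]
      congr 1

theorem pvBndN_run (tw : List (String × String × String)) :
    ∀ (a : String × String × String) (rest' : List (String × String × String)) (s : Nat),
    (∀ y ∈ tw, y.2.1 = a.2.1) →
    (∀ q ∈ rest'.head?, q.2.1 ≠ a.2.1) →
    pvBndN ((a :: tw) ++ rest') s
      = if rest'.isEmpty then [] else (s + tw.length) :: pvBndN rest' (s + tw.length + 1) := by
  induction tw with
  | nil =>
    intro a rest' s _ hne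
    cases rest' with
    | nil => simp [pvBndN]
    | cons q t =>
      have : (q.2.1 != a.2.1) = true := by
        simp only [bne_iff_ne, ne_eq]; exact hne q (by simp)
      simp [pvBndN, this]
  | cons b tw' ih =>
    intro a rest' s hall hne
    have hba : b.2.1 = a.2.1 := hall b (by simp)
    have h1 : (b.2.1 != a.2.1) = false := by simp [bne, hba]
    have hrec := ih b rest' (s + 1)
      (fun y hy => (hall y (by simp [hy])).trans hba.symm)
      (fun q hq h => hne q hq (h.trans hba))
    simp only [List.cons_append, pvBndN, h1, Bool.false_eq_true, if_false, List.nil_append]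
    rw [show (b :: tw') ++ rest' = b :: (tw' ++ rest') by simp] at hrec
    rw [hrec]
    cases rest'.isEmpty <;> simp <;> refine ⟨by omega, by rw [show s + (tw'.length + 1) + 1 = s + 1 + tw'.length + 1 by omega]⟩

theorem pvBndN_shift (l : List (String × String × String)) :
    ∀ (s t : Nat), pvBndN l (s + t) = (pvBndN l s).map (· + t) := by
  induction l with
  | nil => intro s t; simp [pvBndN]
  | cons a l' ih =>
    intro s t
    cases l' with
    | nil => simp [pvBndN]
    | cons b t' =>
      simp only [pvBndN]
      rw [show s + t + 1 = (s + 1) + t by omega, ih (s+1) t]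
      by_cases h : (b.2.1 != a.2.1) = true <;> simp [h]

theorem pvBuildN_shift (pre l : List (String × String × String)) (bs : List Nat) :
    pvBuildN (pre ++ l) (bs.map (· + pre.length)) = pvBuildN l bs := by
  unfold pvBuildN
  rw [← List.map_tail, List.zip_map, List.map_map]
  apply List.map_congr_left
  intro be _
  obtain ⟨b1, b2⟩ := be
  simp only [Function.comp_apply, Prod.map_apply]
  rw [show b1 + pre.length = pre.length + b1 by omega, List.drop_append,
      List.drop_eq_nil_of_le (by omega), List.nil_append,
      show pre.length + b1 - pre.length = b1 by omega,
      show b2 + pre.length - (pre.length + b1) = b2 - b1 by omega]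

theorem pvAlt_go (path : List (String × String × String)) (hne : path ≠ []) :
    pvBuildN path (0 :: pvBndN path 1 ++ [path.length]) = pvAltGo path := by
  induction path using pvAltGo.induct with
  | case1 => exact absurd rfl hne
  | case2 st ln dir rest rest'0 ih =>
    have hsplit : rest = rest.takeWhile (fun y => y.2.1 == ln) ++ rest.dropWhile (fun y => y.2.1 == ln) :=
      (List.takeWhile_append_dropWhile).symm
    have hgrp : ∀ y ∈ rest.takeWhile (fun y => y.2.1 == ln), y.2.1 = ln := by
      intro y hy
      simpa using List.mem_takeWhile_imp hy
    have hhd : ∀ q ∈ (rest.dropWhile (fun y => y.2.1 == ln)).head?, q.2.1 ≠ ln := by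
      intro q hq
      have hne2 : rest.dropWhile (fun y => y.2.1 == ln) ≠ [] := by
        intro h; rw [h] at hq; simp at hq
      have hf := List.head_dropWhile_not (p := fun y => y.2.1 == ln) (l := rest) hne2
      have hqe : q = (rest.dropWhile (fun y => y.2.1 == ln)).head hne2 := by
        rw [List.head?_eq_head hne2] at hq; exact (Option.mem_some_iff.mp hq).symm
      rw [hqe]; simpa using hf
    have hrun := pvBndN_run (rest.takeWhile (fun y => y.2.1 == ln)) (st, ln, dir)
      (rest.dropWhile (fun y => y.2.1 == ln)) 1 (by simpa using hgrp) (by simpa using hhd)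
    have hpath : (st, ln, dir) :: rest
        = ((st, ln, dir) :: rest.takeWhile (fun y => y.2.1 == ln)) ++ rest.dropWhile (fun y => y.2.1 == ln) := by
      simp [← hsplit]
    cases hr : rest.dropWhile (fun y => y.2.1 == ln) with
    | nil =>
      have hrest : rest = rest.takeWhile (fun y => y.2.1 == ln) := by
        conv_lhs => rw [hsplit]
        simp [hr]
      have hb : pvBndN ((st, ln, dir) :: rest) 1 = [] := by
        rw [hpath, hr]; simpa [hr] using hrun
      rw [hb, pvAltGo]
      simp only [hr, pvAltGo]
      simp [pvBuildN, pvFmtSeg, pvEmit, ← hrest]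
      rw [List.take_of_length_le (by simp)]
    | cons q0 t =>
      have hb : pvBndN ((st, ln, dir) :: rest) 1
          = (1 + (rest.takeWhile (fun y => y.2.1 == ln)).length)
            :: pvBndN (rest.dropWhile (fun y => y.2.1 == ln))
                 (1 + (rest.takeWhile (fun y => y.2.1 == ln)).length + 1) := by
      -- wait: rewrite rest' occurrences: hrun mentions dropWhile; keep as is
        rw [hpath, hrun]
        simp [hr]
      have hihne : rest.dropWhile (fun y => y.2.1 == ln) ≠ [] := by simp [hr]
      have hih : pvBuildN (rest.dropWhile (fun y => y.2.1 == ln))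
          (0 :: pvBndN (rest.dropWhile (fun y => y.2.1 == ln)) 1
            ++ [(rest.dropWhile (fun y => y.2.1 == ln)).length])
          = pvAltGo (rest.dropWhile (fun y => y.2.1 == ln)) := ih hihne
      set m := (rest.takeWhile (fun y => y.2.1 == ln)).length with hm
      have hshift : pvBndN (rest.dropWhile (fun y => y.2.1 == ln)) (1 + m + 1)
          = (pvBndN (rest.dropWhile (fun y => y.2.1 == ln)) 1).map (· + (m + 1)) := by
        rw [show 1 + m + 1 = 1 + (m + 1) by omega]
        exact pvBndN_shift _ 1 (m + 1)
      have hlen : ((st, ln, dir) :: rest).length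
          = (m + 1) + (rest.dropWhile (fun y => y.2.1 == ln)).length := by
        have h3 : rest.length = m + (rest.dropWhile (fun y => y.2.1 == ln)).length := by
          rw [hm, ← List.length_append, ← hsplit]
        simp only [List.length_cons]
        omega
      rw [pvAltGo]
      rw [hb, hshift, ← hih, hlen]
      -- now: pvBuildN path (0 :: (1+m) :: map (·+(m+1)) B ++ [(m+1)+L]) = head :: pvBuildN rest' (0::B++[L])
      have hkey : (((1 + m) :: (pvBndN (rest.dropWhile (fun y => y.2.1 == ln)) 1).map (· + (m + 1)))
            ++ [m + 1 + (rest.dropWhile (fun y => y.2.1 == ln)).length])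
          = ((0 :: pvBndN (rest.dropWhile (fun y => y.2.1 == ln)) 1
              ++ [(rest.dropWhile (fun y => y.2.1 == ln)).length]).map (· + (m + 1))) := by
        simp
        omega
      simp only [List.cons_append] at hkey ⊢
      rw [hkey]
      -- peel the first pair of the zip
      have hzip : ∀ (b0 : Nat) (bs : List Nat), ((0:Nat) :: b0 :: bs).zip ((0:Nat) :: b0 :: bs).tail
          = (0, b0) :: ((b0 :: bs).zip (b0 :: bs).tail) := by intro b0 bs; simp
      unfold pvBuildN
      cases hB : (0 :: (pvBndN (rest.dropWhile (fun y => y.2.1 == ln)) 1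
          ++ [(rest.dropWhile (fun y => y.2.1 == ln)).length])).map (· + (m + 1)) with
      | nil => simp at hB
      | cons c cs =>
        rw [hzip c cs, List.map_cons]
        congr 1
        · -- head segment
          have hc : c = m + 1 := by
            have := congrArg List.head? hB
            simp at this
            omega
          rw [hc]
          simp only [List.drop_zero, Nat.sub_zero]
          rw [hpath, List.take_append_of_le_length (by simp [hm])]
          rw [show m + 1 = ((st, ln, dir) :: rest.takeWhile (fun y => y.2.1 == ln)).length by simp [hm]]
          rw [List.take_length]
          simp [pvFmtSeg, pvEmit]
        · -- shifted tail
          have := pvBuildN_shift ((st, ln, dir) :: rest.takeWhile (fun y => y.2.1 == ln))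
            (rest.dropWhile (fun y => y.2.1 == ln))
            (0 :: (pvBndN (rest.dropWhile (fun y => y.2.1 == ln)) 1
              ++ [(rest.dropWhile (fun y => y.2.1 == ln)).length]))
          rw [show ((st, ln, dir) :: rest.takeWhile (fun y => y.2.1 == ln)).length = m + 1 by simp [hm]] at this
          rw [← hpath] at this
          unfold pvBuildN at this
          rw [hB] at this
          simpa using this

-- ===== VERDICT (by name: the statement is the Claim_ definition above) =====
theorem format_route_segments_spec : Claim_equal_format_route_segments := by
  intro path _
  unfold Spec_format_route_segments
  cases path with
  | nil => rfl
  | cons p0 rest =>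
    obtain ⟨st0, ln0, dir0⟩ := p0
    have hA : format_route_segments ((st0, ln0, dir0) :: rest)
        = pvAltGo ((st0, ln0, dir0) :: rest) := by
      unfold format_route_segments
      simp only []
      rw [pvLoop rest [] ln0 dir0 [st0], pvAltGo]
      simp
    have hB : format_route_segments_alt ((st0, ln0, dir0) :: rest)
        = pvBuildN ((st0, ln0, dir0) :: rest)
            (0 :: pvBndN ((st0, ln0, dir0) :: rest) 1 ++ [((st0, ln0, dir0) :: rest).length]) := by
      unfold format_route_segments_alt
      simp only []
      have h1 := pvBnd_eq ((st0, ln0, dir0) :: rest) 1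
      rw [show ((1 : Nat) : Int) = (1 : Int) by norm_num] at h1
      rw [h1]
      rw [show (0 : Int) :: (pvBndN ((st0, ln0, dir0) :: rest) 1).map (fun (n : Nat) => (n : Int))
            ++ [(((st0, ln0, dir0) :: rest).length : Int)]
          = ((0 :: pvBndN ((st0, ln0, dir0) :: rest) 1
              ++ [((st0, ln0, dir0) :: rest).length]).map (fun (n : Nat) => (n : Int))) by simp]
      exact pvCast _ _
    rw [hA, hB]
    exact (pvAlt_go _ (by simp)).symm
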